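-- pv_equiv track=rewrite | github.com/biancofla/dao-proposal-group-6 | smart_contract/contract_ops.py | _get_voting_key
-- ===== SOURCE A (Python) =====
-- def _get_voting_key(partecipants, index, p, x):
--     voting_key = 1
--     for idx, g_x_idx in partecipants.items():
--         idx = int.from_bytes(idx.encode(), "big")
--         if idx < index:
--             voting_key = (voting_key * g_x_idx) % p
--         else:
--             voting_key = (voting_key * pow(index, -1, p)) % p
--     return pow(voting_key, x, p)
-- ===== SOURCE B (Python) =====
-- def _get_voting_key(partecipants, index, p, x):
--     def reduce(seq):
--         # divide-and-conquer product tree over seq: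
--         # (product mod p of values with key-number < index, count of the others)
--         if not seq:
--             return 1, 0
--         if len(seq) == 1:
--             k, g = seq[0]
--             if int.from_bytes(k.encode(), "big") < index:
--                 return g % p, 0
--             return 1, 1
--         mid = len(seq) // 2
--         pl, nl = reduce(seq[:mid])
--         pr, nr = reduce(seq[mid:])
--         return pl * pr % p, nl + nr
--     product, missing = reduce(list(partecipants.items()))
--     if missing:
--         product = product * pow(pow(index, -1, p), missing, p) % p
--     return pow(product, x, p)
-- ===== Notes on version B (the rewrite author's own statement) =====
-- stated objective: alternative
-- what changed: A is a single linear pass that recomputes the modular inverse pow(index,-1,p) and multiplies it in once per participant with key >= index; B instead aggregates with a recursive divide-and-conquer product tree over the halves of the participant list, returning (product mod p of small-key values, count of the rest), and afterwards folds all inverse contributions in at once as pow(pow(index,-1,p), count, p) (computed only when the count is positive, preserving A's raise behaviour); Pre_ excludes exactly the inputs where A raises (p == 0; a key >= index with index not invertible mod p; …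
import Mathlib
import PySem

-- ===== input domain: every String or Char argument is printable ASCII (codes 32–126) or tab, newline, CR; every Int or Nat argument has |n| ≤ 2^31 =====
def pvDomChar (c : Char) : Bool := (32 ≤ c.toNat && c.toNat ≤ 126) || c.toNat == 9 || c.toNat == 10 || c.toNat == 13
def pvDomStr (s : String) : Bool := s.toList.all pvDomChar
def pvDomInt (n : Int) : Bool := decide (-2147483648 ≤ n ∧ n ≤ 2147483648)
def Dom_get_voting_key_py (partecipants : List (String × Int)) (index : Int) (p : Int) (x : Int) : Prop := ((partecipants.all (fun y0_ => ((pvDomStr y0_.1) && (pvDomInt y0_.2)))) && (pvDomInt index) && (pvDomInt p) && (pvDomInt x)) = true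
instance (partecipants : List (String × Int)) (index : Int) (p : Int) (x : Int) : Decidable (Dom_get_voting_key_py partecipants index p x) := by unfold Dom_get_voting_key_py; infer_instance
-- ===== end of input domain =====

-- B replaces A's single linear pass (which recomputes pow(index,-1,p) per participant) by a
-- recursive divide-and-conquer product tree returning (product mod p, count of non-small keys),
-- folding all inverse contributions in afterwards with one exponentiation (objective: alternative).

-- shared primitives: int.from_bytes(s.encode(), "big") for one-byte (ASCII) chars,
-- and Python's three-argument pow (none exactly where Python raises)
def pvInvMod? (a m : Int) : Option Int :=
  if m = 0 then none
  else if Int.gcd (PySem.Int.mod a m) m = 1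
    then some (PySem.Int.mod (Int.gcdA (PySem.Int.mod a m) m) m)
    else none

-- square-and-multiply modular exponentiation (CPython's algorithm for 3-argument pow;
-- PySem.Int.powMod materialises b^e and is infeasible for large e); base reduced mod m first
def pvPowModGo (b0 m : Int) (e : Nat) : Int :=
  if e = 0 then PySem.Int.mod 1 m
  else
    let h := pvPowModGo b0 m (e / 2)
    let h2 := PySem.Int.mod (h * h) m
    if e % 2 = 1 then PySem.Int.mod (h2 * b0) m else h2
termination_by e
decreasing_by exact Nat.div_lt_self (Nat.pos_of_ne_zero (by assumption)) (by norm_num)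

def pvPowMod (b : Int) (e : Nat) (m : Int) : Int :=
  pvPowModGo (PySem.Int.mod b m) m e

def pvPow3? (b e m : Int) : Option Int :=
  if m = 0 then none
  else if e < 0 then
    match pvInvMod? b m with
    | none => none
    | some i => some (pvPowMod i (-e).toNat m)
  else some (pvPowMod b e.toNat m)

def pvKeyNum (s : String) : Int :=
  s.toList.foldl (fun a c => 256 * a + (c.toNat : Int)) 0


-- ===== PORT A =====
def get_voting_key_py (partecipants : List (String × Int)) (index : Int) (p : Int) (x : Int) : Int :=
  match partecipants.foldl
      (fun (acc : Option Int) (kv : String × Int) =>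
        match acc with
        | none => none
        | some voting_key =>
          if pvKeyNum kv.1 < index then some (PySem.Int.mod (voting_key * kv.2) p)
          else
            match pvInvMod? index p with
            | none => none
            | some i => some (PySem.Int.mod (voting_key * i) p))
      (some 1) with
  | none => 0
  | some voting_key => (pvPow3? voting_key x p).getD 0

-- ===== PORT B =====
-- Source B's recursive helper `reduce`: divide-and-conquer over the halves of the list
def pvReduce (index p : Int) (l : List (String × Int)) : Int × Nat :=
  match l with
  | [] => (1, 0)
  | [kv] => if pvKeyNum kv.1 < index then (PySem.Int.mod kv.2 p, 0) else (1, 1)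
  | a :: b :: t =>
    let seq := a :: b :: t
    let mid := seq.length / 2
    let L := pvReduce index p (seq.take mid)
    let R := pvReduce index p (seq.drop mid)
    (PySem.Int.mod (L.1 * R.1) p, L.2 + R.2)
termination_by l.length
decreasing_by
  · simp only [List.length_take, List.length_cons]; omega
  · simp only [List.length_drop, List.length_cons]; omega

def get_voting_key_py_alt (partecipants : List (String × Int)) (index : Int) (p : Int) (x : Int) : Int :=
  let r := pvReduce index p partecipants
  -- pow(index,-1,p) is looked up only when missing > 0, as in Source B; its getD default is
  -- never reached inside Pre_ (there the inverse exists whenever missing > 0)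
  let product :=
    if r.2 = 0 then r.1
    else PySem.Int.mod (r.1 * pvPowMod ((pvInvMod? index p).getD 0) r.2 p) p
  (pvPow3? product x p).getD 0

-- ===== PRECONDITION & SPEC =====
-- exactly the inputs on which A returns (no exception): p ≠ 0; if some key encodes to ≥ index
-- (the else-branch is taken) then index must be invertible mod p; and if x < 0 every value
-- multiplied in (keys encoding below index) must be coprime to p so the final pow's base is invertible
def Pre_get_voting_key_py (partecipants : List (String × Int)) (index : Int) (p : Int) (x : Int) : Prop :=
  p ≠ 0 ∧
  ((∃ kv ∈ partecipants, index ≤ pvKeyNum kv.1) → Int.gcd index p = 1) ∧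
  (x < 0 → ∀ kv ∈ partecipants, pvKeyNum kv.1 < index → Int.gcd kv.2 p = 1)
instance (partecipants : List (String × Int)) (index : Int) (p : Int) (x : Int) : Decidable (Pre_get_voting_key_py partecipants index p x) := by unfold Pre_get_voting_key_py; infer_instance

def pvWitness_get_voting_key_py : (List (String × Int)) × Int × Int × Int := ([("a", 2)], 200, 7, 3)

def Spec_get_voting_key_py (partecipants : List (String × Int)) (index : Int) (p : Int) (x : Int) (out : Int) : Prop := out = get_voting_key_py_alt partecipants index p x
instance (partecipants : List (String × Int)) (index : Int) (p : Int) (x : Int) (out : Int) : Decidable (Spec_get_voting_key_py partecipants index p x out) := by unfold Spec_get_voting_key_py; infer_instance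

-- ===== CLAIM (what is proved, stated in full; the proofs are below) =====
def Claim_equal_get_voting_key_py : Prop := ∀ (partecipants : List (String × Int)) (index : Int) (p : Int) (x : Int), Dom_get_voting_key_py partecipants index p x → Pre_get_voting_key_py partecipants index p x → Spec_get_voting_key_py partecipants index p x (get_voting_key_py partecipants index p x)

-- ===== LEMMAS AND PROOFS =====

theorem pv_mod_dvd (a p : Int) : p ∣ (PySem.Int.mod a p - a) := by
  simp [PySem.Int.mod]
  exact Int.dvd_fmod_sub_self

theorem pv_mod_sub (a b p : Int) (h : p ∣ a - b) :
    p ∣ (PySem.Int.mod a p - PySem.Int.mod b p) := by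
  have h1 := pv_mod_dvd a p
  have h2 := pv_mod_dvd b p
  have e : PySem.Int.mod a p - PySem.Int.mod b p
      = (PySem.Int.mod a p - a) - (PySem.Int.mod b p - b) + (a - b) := by ring
  rw [e]; exact dvd_add (dvd_sub h1 h2) h

theorem pv_mod_congr (a b p : Int) (h : p ∣ a - b) :
    PySem.Int.mod a p = PySem.Int.mod b p := by
  rcases eq_or_ne p 0 with h0 | h0
  · subst h0
    have : a - b = 0 := by simpa using h
    have : a = b := by omega
    rw [this]
  · have hd := pv_mod_sub a b p h
    have := Int.eq_zero_of_abs_lt_dvd ((abs_dvd p _).mpr hd) ?_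
    · omega
    · rcases lt_or_gt_of_ne h0 with hp | hp
      · have b1 := PySem.Int.mod_neg_bounds (a := a) hp
        have b2 := PySem.Int.mod_neg_bounds (a := b) hp
        rw [abs_of_neg hp, abs_lt]; omega
      · have b1 := PySem.Int.mod_nonneg (a := a) hp
        have b2 := PySem.Int.mod_lt (a := a) hp
        have b3 := PySem.Int.mod_nonneg (a := b) hp
        have b4 := PySem.Int.mod_lt (a := b) hp
        rw [abs_of_pos hp, abs_lt]; omega

theorem pv_gcd_mod (a m : Int) : Int.gcd (PySem.Int.mod a m) m = Int.gcd a m := by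
  simp [PySem.Int.mod, Int.fmod_def]

theorem pv_dvd_trans3 (m a b c : Int) (h1 : m ∣ a - b) (h2 : m ∣ b - c) : m ∣ a - c := by
  have e : a - c = (a - b) + (b - c) := by ring
  rw [e]; exact dvd_add h1 h2

theorem pv_powModGo_dvd (b0 m : Int) (e : Nat) : m ∣ pvPowModGo b0 m e - b0 ^ e := by
  induction e using Nat.strong_induction_on with
  | _ e ih =>
    rcases Nat.eq_zero_or_pos e with he | he
    · subst he
      rw [pvPowModGo]
      simpa using pv_mod_dvd 1 m
    · have hlt : e / 2 < e := Nat.div_lt_self he (by norm_num)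
      have ih2 := ih (e / 2) hlt
      rw [pvPowModGo, if_neg (Nat.pos_iff_ne_zero.mp he)]
      have hsq : m ∣ PySem.Int.mod (pvPowModGo b0 m (e / 2) * pvPowModGo b0 m (e / 2)) m
          - b0 ^ (2 * (e / 2)) := by
        have h1 := pv_mod_dvd (pvPowModGo b0 m (e / 2) * pvPowModGo b0 m (e / 2)) m
        have h2 : m ∣ pvPowModGo b0 m (e / 2) * pvPowModGo b0 m (e / 2)
            - b0 ^ (e / 2) * b0 ^ (e / 2) := by
          have e1 : pvPowModGo b0 m (e / 2) * pvPowModGo b0 m (e / 2)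
              - b0 ^ (e / 2) * b0 ^ (e / 2)
              = (pvPowModGo b0 m (e / 2) - b0 ^ (e / 2)) * pvPowModGo b0 m (e / 2)
                + b0 ^ (e / 2) * (pvPowModGo b0 m (e / 2) - b0 ^ (e / 2)) := by ring
          rw [e1]
          exact dvd_add (ih2.mul_right _) (ih2.mul_left _)
        have e2 : b0 ^ (2 * (e / 2)) = b0 ^ (e / 2) * b0 ^ (e / 2) := by
          rw [two_mul, pow_add]
        rw [e2]
        exact pv_dvd_trans3 m _ _ _ h1 h2
      by_cases ho : e % 2 = 1
      · simp only [ho, if_pos]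
        have h3 := pv_mod_dvd (PySem.Int.mod (pvPowModGo b0 m (e / 2) * pvPowModGo b0 m (e / 2)) m * b0) m
        have h4 : m ∣ PySem.Int.mod (pvPowModGo b0 m (e / 2) * pvPowModGo b0 m (e / 2)) m * b0
            - b0 ^ e := by
          have e3 : b0 ^ e = b0 ^ (2 * (e / 2)) * b0 := by
            rw [← pow_succ]
            congr 1
            omega
          rw [e3]
          have := hsq.mul_right b0
          rwa [sub_mul] at this
        exact pv_dvd_trans3 m _ _ _ h3 h4
      · have ho' : e % 2 = 0 := by omega
        simp only [ho']
        have e4 : (2 : Nat) * (e / 2) = e := by omega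
        rw [e4] at hsq
        simpa using hsq

theorem pv_powMod_dvd (b : Int) (e : Nat) (m : Int) : m ∣ pvPowMod b e m - b ^ e := by
  unfold pvPowMod
  have h1 := pv_powModGo_dvd (PySem.Int.mod b m) m e
  have h2 : m ∣ (PySem.Int.mod b m) ^ e - b ^ e :=
    dvd_trans (pv_mod_dvd b m) (sub_dvd_pow_sub_pow _ _ e)
  exact pv_dvd_trans3 m _ _ _ h1 h2

theorem pvPow3?_congr (a b e p : Int) (h : p ∣ a - b) : pvPow3? a e p = pvPow3? b e p := by
  have hmod : PySem.Int.mod a p = PySem.Int.mod b p := pv_mod_congr a b p h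
  unfold pvPow3? pvInvMod?
  rcases eq_or_ne p 0 with h0 | h0
  · simp [h0]
  · simp only [h0, if_false, hmod]
    split
    · rfl
    · have hpow : ∀ n : Nat, pvPowMod a n p = pvPowMod b n p := by
        intro n
        unfold pvPowMod
        rw [hmod]
      simp [hpow]


def pvWB (index p : Int) (l : List (String × Int)) (v : Int) : Int :=
  l.foldl (fun a kv => if pvKeyNum kv.1 < index then PySem.Int.mod (a * kv.2) p else a) v

def pvWA (index p i : Int) (l : List (String × Int)) (v : Int) : Int :=
  l.foldl (fun a kv => if pvKeyNum kv.1 < index then PySem.Int.mod (a * kv.2) p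
                       else PySem.Int.mod (a * i) p) v

def pvCB (index : Int) (l : List (String × Int)) : Nat :=
  l.countP (fun kv => !decide (pvKeyNum kv.1 < index))

theorem pvWB_cons (index p : Int) (kv : String × Int) (t : List (String × Int)) (v : Int) :
    pvWB index p (kv :: t) v
      = pvWB index p t (if pvKeyNum kv.1 < index then PySem.Int.mod (v * kv.2) p else v) := by
  simp only [pvWB, List.foldl_cons]

theorem pvWA_cons (index p i : Int) (kv : String × Int) (t : List (String × Int)) (v : Int) :
    pvWA index p i (kv :: t) v
      = pvWA index p i t (if pvKeyNum kv.1 < index then PySem.Int.mod (v * kv.2) p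
                          else PySem.Int.mod (v * i) p) := by
  simp only [pvWA, List.foldl_cons]

theorem pvCB_cons (index : Int) (kv : String × Int) (t : List (String × Int)) :
    pvCB index (kv :: t)
      = (if pvKeyNum kv.1 < index then 0 else 1) + pvCB index t := by
  by_cases hs : pvKeyNum kv.1 < index
  · simp [pvCB, hs]
  · simp [pvCB, hs]
    omega

theorem pvWB_congr (index p : Int) (l : List (String × Int)) (a b : Int) (h : p ∣ a - b) :
    p ∣ (pvWB index p l a - pvWB index p l b) := by
  induction l generalizing a b with
  | nil => simpa [pvWB] using h
  | cons kv t ih =>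
    rw [pvWB_cons, pvWB_cons]
    by_cases hs : pvKeyNum kv.1 < index
    · simp only [if_pos hs]
      refine ih _ _ (pv_mod_sub _ _ p ?_)
      have := Dvd.dvd.mul_right h kv.2
      rwa [sub_mul] at this
    · simp only [if_neg hs]
      exact ih _ _ h

theorem pvWB_mul (index p : Int) (l : List (String × Int)) (v c : Int) :
    p ∣ (pvWB index p l (v * c) - pvWB index p l v * c) := by
  induction l generalizing v with
  | nil => simp [pvWB]
  | cons kv t ih =>
    rw [pvWB_cons, pvWB_cons]
    by_cases hs : pvKeyNum kv.1 < index
    · simp only [if_pos hs]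
      have h1 : p ∣ pvWB index p t (PySem.Int.mod (v * c * kv.2) p)
          - pvWB index p t (v * kv.2 * c) := by
        apply pvWB_congr
        have h0 := pv_mod_dvd (v * c * kv.2) p
        have e : PySem.Int.mod (v * c * kv.2) p - v * kv.2 * c
            = PySem.Int.mod (v * c * kv.2) p - v * c * kv.2 := by ring
        rw [e]; exact h0
      have h2 : p ∣ pvWB index p t (v * kv.2 * c) - pvWB index p t (v * kv.2) * c := ih (v * kv.2)
      have h3 : p ∣ (pvWB index p t (v * kv.2) - pvWB index p t (PySem.Int.mod (v * kv.2) p)) * c := by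
        apply Dvd.dvd.mul_right
        apply pvWB_congr
        have h0 := pv_mod_dvd (v * kv.2) p
        have e : v * kv.2 - PySem.Int.mod (v * kv.2) p
            = -(PySem.Int.mod (v * kv.2) p - v * kv.2) := by ring
        rw [e]; exact dvd_neg.mpr h0
      have e : pvWB index p t (PySem.Int.mod (v * c * kv.2) p)
          - pvWB index p t (PySem.Int.mod (v * kv.2) p) * c
          = (pvWB index p t (PySem.Int.mod (v * c * kv.2) p) - pvWB index p t (v * kv.2 * c))
            + (pvWB index p t (v * kv.2 * c) - pvWB index p t (v * kv.2) * c)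
            + (pvWB index p t (v * kv.2) - pvWB index p t (PySem.Int.mod (v * kv.2) p)) * c := by
        ring
      rw [e]
      exact dvd_add (dvd_add h1 h2) h3
    · simp only [if_neg hs]
      exact ih v

theorem pvWA_WB (index p i : Int) (l : List (String × Int)) (v : Int) :
    p ∣ (pvWA index p i l v - pvWB index p l v * i ^ pvCB index l) := by
  induction l generalizing v with
  | nil => simp [pvWA, pvWB, pvCB]
  | cons kv t ih =>
    rw [pvWA_cons, pvWB_cons, pvCB_cons]
    by_cases hs : pvKeyNum kv.1 < index
    · simp only [if_pos hs, zero_add]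
      exact ih (PySem.Int.mod (v * kv.2) p)
    · simp only [if_neg hs]
      have h1 := ih (PySem.Int.mod (v * i) p)
      have h2 : p ∣ pvWB index p t (PySem.Int.mod (v * i) p) - pvWB index p t (v * i) := by
        apply pvWB_congr
        exact pv_mod_dvd (v * i) p
      have h3 := pvWB_mul index p t v i
      have e : pvWA index p i t (PySem.Int.mod (v * i) p)
          - pvWB index p t v * i ^ (1 + pvCB index t)
          = (pvWA index p i t (PySem.Int.mod (v * i) p)
              - pvWB index p t (PySem.Int.mod (v * i) p) * i ^ pvCB index t)
            + (pvWB index p t (PySem.Int.mod (v * i) p) - pvWB index p t (v * i)) * i ^ pvCB index t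
            + (pvWB index p t (v * i) - pvWB index p t v * i) * i ^ pvCB index t := by
        rw [pow_add, pow_one]; ring
      rw [e]
      exact dvd_add (dvd_add h1 (h2.mul_right _)) (h3.mul_right _)

-- pvWB over an append, up to congruence mod p
theorem pvWB_append (index p : Int) (l1 l2 : List (String × Int)) :
    pvWB index p (l1 ++ l2) 1 = pvWB index p l2 (pvWB index p l1 1) := by
  simp [pvWB, List.foldl_append]

-- the divide-and-conquer reduce agrees with the linear fold mod p and counts exactly
theorem pvReduce_spec (index p : Int) (l : List (String × Int)) :
    p ∣ ((pvReduce index p l).1 - pvWB index p l 1) ∧ (pvReduce index p l).2 = pvCB index l := by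
  induction l using pvReduce.induct index p with
  | case1 => simp [pvReduce, pvWB, pvCB]
  | case2 kv hs =>
    refine ⟨?_, by simp [pvReduce, hs, pvCB]⟩
    simp only [pvReduce, if_pos hs, pvWB, List.foldl_cons]
    exact pv_mod_sub _ _ p (by simp)
  | case3 kv hs =>
    refine ⟨?_, by simp [pvReduce, hs, pvCB]⟩
    simp [pvReduce, hs, pvWB]
  | case4 a b t seq mid ihL ihR =>
    rw [pvReduce]
    simp only
    obtain ⟨hL1, hL2⟩ := ihL
    obtain ⟨hR1, hR2⟩ := ihR
    have hsplit : (a :: b :: t : List (String × Int))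
        = (a :: b :: t).take ((a :: b :: t).length / 2) ++ (a :: b :: t).drop ((a :: b :: t).length / 2) :=
      (List.take_append_drop _ _).symm
    constructor
    · -- mod (L.1 * R.1) p ≡ pvWB seq 1
      have hW : pvWB index p (a :: b :: t) 1
          = pvWB index p ((a :: b :: t).drop ((a :: b :: t).length / 2))
              (pvWB index p ((a :: b :: t).take ((a :: b :: t).length / 2)) 1) := by
        conv_lhs => rw [hsplit]
        rw [pvWB_append]
      have h0 : p ∣ PySem.Int.mod ((pvReduce index p ((a :: b :: t).take ((a :: b :: t).length / 2))).1
            * (pvReduce index p ((a :: b :: t).drop ((a :: b :: t).length / 2))).1) p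
          - pvWB index p ((a :: b :: t).take ((a :: b :: t).length / 2)) 1
            * pvWB index p ((a :: b :: t).drop ((a :: b :: t).length / 2)) 1 := by
        have hm := pv_mod_dvd ((pvReduce index p ((a :: b :: t).take ((a :: b :: t).length / 2))).1
            * (pvReduce index p ((a :: b :: t).drop ((a :: b :: t).length / 2))).1) p
        have hprod : p ∣ (pvReduce index p ((a :: b :: t).take ((a :: b :: t).length / 2))).1
              * (pvReduce index p ((a :: b :: t).drop ((a :: b :: t).length / 2))).1
            - pvWB index p ((a :: b :: t).take ((a :: b :: t).length / 2)) 1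
              * pvWB index p ((a :: b :: t).drop ((a :: b :: t).length / 2)) 1 := by
          have e : (pvReduce index p ((a :: b :: t).take ((a :: b :: t).length / 2))).1
              * (pvReduce index p ((a :: b :: t).drop ((a :: b :: t).length / 2))).1
              - pvWB index p ((a :: b :: t).take ((a :: b :: t).length / 2)) 1
                * pvWB index p ((a :: b :: t).drop ((a :: b :: t).length / 2)) 1
              = ((pvReduce index p ((a :: b :: t).take ((a :: b :: t).length / 2))).1
                  - pvWB index p ((a :: b :: t).take ((a :: b :: t).length / 2)) 1)
                  * (pvReduce index p ((a :: b :: t).drop ((a :: b :: t).length / 2))).1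
                + pvWB index p ((a :: b :: t).take ((a :: b :: t).length / 2)) 1
                  * ((pvReduce index p ((a :: b :: t).drop ((a :: b :: t).length / 2))).1
                    - pvWB index p ((a :: b :: t).drop ((a :: b :: t).length / 2)) 1) := by ring
          rw [e]
          exact dvd_add (hL1.mul_right _) (hR1.mul_left _)
        exact pv_dvd_trans3 p _ _ _ hm hprod
      have h1 : p ∣ pvWB index p ((a :: b :: t).take ((a :: b :: t).length / 2)) 1
            * pvWB index p ((a :: b :: t).drop ((a :: b :: t).length / 2)) 1
          - pvWB index p (a :: b :: t) 1 := by
        rw [hW]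
        have h2 := pvWB_mul index p ((a :: b :: t).drop ((a :: b :: t).length / 2)) 1
          (pvWB index p ((a :: b :: t).take ((a :: b :: t).length / 2)) 1)
        simp only [one_mul] at h2
        have e : pvWB index p ((a :: b :: t).take ((a :: b :: t).length / 2)) 1
              * pvWB index p ((a :: b :: t).drop ((a :: b :: t).length / 2)) 1
            - pvWB index p ((a :: b :: t).drop ((a :: b :: t).length / 2))
                (pvWB index p ((a :: b :: t).take ((a :: b :: t).length / 2)) 1)
            = -(pvWB index p ((a :: b :: t).drop ((a :: b :: t).length / 2))
                  (pvWB index p ((a :: b :: t).take ((a :: b :: t).length / 2)) 1)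
                - pvWB index p ((a :: b :: t).drop ((a :: b :: t).length / 2)) 1
                  * pvWB index p ((a :: b :: t).take ((a :: b :: t).length / 2)) 1)
              + (pvWB index p ((a :: b :: t).drop ((a :: b :: t).length / 2)) 1
                  * pvWB index p ((a :: b :: t).take ((a :: b :: t).length / 2)) 1
                - pvWB index p ((a :: b :: t).take ((a :: b :: t).length / 2)) 1
                  * pvWB index p ((a :: b :: t).drop ((a :: b :: t).length / 2)) 1) := by ring
        rw [e]
        refine dvd_add (dvd_neg.mpr h2) ?_
        have e2 : pvWB index p ((a :: b :: t).drop ((a :: b :: t).length / 2)) 1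
              * pvWB index p ((a :: b :: t).take ((a :: b :: t).length / 2)) 1
            - pvWB index p ((a :: b :: t).take ((a :: b :: t).length / 2)) 1
              * pvWB index p ((a :: b :: t).drop ((a :: b :: t).length / 2)) 1 = 0 := by ring
        have e3 : ∀ u v : Int, u * v - v * u = 0 := fun u v => by ring
        simp [e3]
      exact pv_dvd_trans3 p _ _ _ h0 h1
    · have hcb : pvCB index (a :: b :: t)
          = pvCB index ((a :: b :: t).take ((a :: b :: t).length / 2))
            + pvCB index ((a :: b :: t).drop ((a :: b :: t).length / 2)) := by
        conv_lhs => rw [hsplit]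
        simp only [pvCB, List.countP_append]
      rw [hL2, hR2, hcb]

theorem pvAfold_small (index p : Int) (l : List (String × Int)) (v : Int)
    (h : ∀ kv ∈ l, pvKeyNum kv.1 < index) :
    l.foldl
      (fun (acc : Option Int) (kv : String × Int) =>
        match acc with
        | none => none
        | some voting_key =>
          if pvKeyNum kv.1 < index then some (PySem.Int.mod (voting_key * kv.2) p)
          else
            match pvInvMod? index p with
            | none => none
            | some i => some (PySem.Int.mod (voting_key * i) p))
      (some v) = some (pvWB index p l v) := by
  induction l generalizing v with
  | nil => simp [pvWB]
  | cons kv t ih =>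
    have hs : pvKeyNum kv.1 < index := h kv (List.mem_cons_self ..)
    rw [pvWB_cons, List.foldl_cons, if_pos hs]
    simp only [if_pos hs]
    exact ih _ (fun a ha => h a (List.mem_cons_of_mem _ ha))

theorem pvAfold (index p i : Int) (hi : pvInvMod? index p = some i)
    (l : List (String × Int)) (v : Int) :
    l.foldl
      (fun (acc : Option Int) (kv : String × Int) =>
        match acc with
        | none => none
        | some voting_key =>
          if pvKeyNum kv.1 < index then some (PySem.Int.mod (voting_key * kv.2) p)
          else
            match pvInvMod? index p with
            | none => none
            | some i => some (PySem.Int.mod (voting_key * i) p))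
      (some v) = some (pvWA index p i l v) := by
  have hf : (fun (acc : Option Int) (kv : String × Int) =>
        match acc with
        | none => none
        | some voting_key =>
          if pvKeyNum kv.1 < index then some (PySem.Int.mod (voting_key * kv.2) p)
          else
            match pvInvMod? index p with
            | none => none
            | some i => some (PySem.Int.mod (voting_key * i) p))
      = (fun (acc : Option Int) (kv : String × Int) =>
        match acc with
        | none => none
        | some voting_key =>
          if pvKeyNum kv.1 < index then some (PySem.Int.mod (voting_key * kv.2) p)
          else some (PySem.Int.mod (voting_key * i) p)) := by
    funext acc kv
    rcases acc with _ | vk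
    · rfl
    · simp only [hi]
  rw [hf]
  induction l generalizing v with
  | nil => simp [pvWA]
  | cons kv t ih =>
    rw [pvWA_cons, List.foldl_cons]
    by_cases hs : pvKeyNum kv.1 < index
    · simp only [if_pos hs]
      exact ih _
    · simp only [if_neg hs]
      exact ih _

theorem pv_main (partecipants : List (String × Int)) (index p x : Int)
    (hp : p ≠ 0)
    (hinv : (∃ kv ∈ partecipants, index ≤ pvKeyNum kv.1) → Int.gcd index p = 1) :
    get_voting_key_py partecipants index p x = get_voting_key_py_alt partecipants index p x := by
  unfold get_voting_key_py get_voting_key_py_alt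
  obtain ⟨hR1, hR2⟩ := pvReduce_spec index p partecipants
  by_cases hc : pvCB index partecipants = 0
  · -- no else-branch taken: both bases are congruent mod p
    have hall : ∀ kv ∈ partecipants, pvKeyNum kv.1 < index := by
      intro kv hkv
      by_contra hge
      have hcnt := List.countP_eq_zero.mp hc kv hkv
      simp_all
    rw [pvAfold_small index p partecipants 1 hall]
    have hz : (pvReduce index p partecipants).2 = 0 := by rw [hR2]; exact hc
    simp only [hz]
    rw [pvPow3?_congr (pvWB index p partecipants 1) (pvReduce index p partecipants).1 x p
      (dvd_sub_comm.mp hR1)]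
    simp
  · -- some key ≥ index: the inverse A computes in its else-branch exists by hinv
    have hex : ∃ kv ∈ partecipants, index ≤ pvKeyNum kv.1 := by
      obtain ⟨kv, hkv, hb⟩ := List.countP_pos_iff.mp (Nat.pos_of_ne_zero hc)
      exact ⟨kv, hkv, by simpa using hb⟩
    have hg' : Int.gcd (PySem.Int.mod index p) p = 1 := by rw [pv_gcd_mod]; exact hinv hex
    have hi : pvInvMod? index p
        = some (PySem.Int.mod (Int.gcdA (PySem.Int.mod index p) p) p) := by
      unfold pvInvMod?
      rw [if_neg hp, if_pos hg']
    set i := PySem.Int.mod (Int.gcdA (PySem.Int.mod index p) p) p with hidef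
    rw [pvAfold index p i hi]
    have hz : ¬ (pvReduce index p partecipants).2 = 0 := by rw [hR2]; exact hc
    simp only [hi, Option.getD_some, hR2]
    have hdvd : p ∣ pvWA index p i partecipants 1
        - PySem.Int.mod ((pvReduce index p partecipants).1 * pvPowMod i (pvCB index partecipants) p) p := by
      have h1 := pvWA_WB index p i partecipants 1
      have h2 : p ∣ (pvWB index p partecipants 1) *
          (i ^ pvCB index partecipants - pvPowMod i (pvCB index partecipants) p) := by
        apply Dvd.dvd.mul_left
        have h0 := pv_powMod_dvd i (pvCB index partecipants) p
        have e : i ^ pvCB index partecipants - pvPowMod i (pvCB index partecipants) p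
            = -(pvPowMod i (pvCB index partecipants) p - i ^ pvCB index partecipants) := by ring
        rw [e]; exact dvd_neg.mpr h0
      have h3 : p ∣ (pvWB index p partecipants 1 - (pvReduce index p partecipants).1)
          * pvPowMod i (pvCB index partecipants) p := by
        apply Dvd.dvd.mul_right
        have e : pvWB index p partecipants 1 - (pvReduce index p partecipants).1
            = -((pvReduce index p partecipants).1 - pvWB index p partecipants 1) := by ring
        rw [e]; exact dvd_neg.mpr hR1
      have h4 := pv_mod_dvd ((pvReduce index p partecipants).1 * pvPowMod i (pvCB index partecipants) p) p
      have e : pvWA index p i partecipants 1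
          - PySem.Int.mod ((pvReduce index p partecipants).1 * pvPowMod i (pvCB index partecipants) p) p
          = (pvWA index p i partecipants 1
              - pvWB index p partecipants 1 * i ^ pvCB index partecipants)
            + (pvWB index p partecipants 1) *
                (i ^ pvCB index partecipants - pvPowMod i (pvCB index partecipants) p)
            + (pvWB index p partecipants 1 - (pvReduce index p partecipants).1)
                * pvPowMod i (pvCB index partecipants) p
            + -(PySem.Int.mod ((pvReduce index p partecipants).1 * pvPowMod i (pvCB index partecipants) p) p
                - (pvReduce index p partecipants).1 * pvPowMod i (pvCB index partecipants) p) := by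
        ring
      rw [e]
      exact dvd_add (dvd_add (dvd_add h1 h2) h3) (dvd_neg.mpr h4)
    rw [pvPow3?_congr _ _ x p hdvd]
    rw [if_neg (hR2 ▸ hc)]

-- ===== VERDICT (by name: the statement is the Claim_ definition above) =====
theorem get_voting_key_py_spec : Claim_equal_get_voting_key_py := by
  intro partecipants index p x _ hpre
  obtain ⟨hp, hinv, -⟩ := hpre
  unfold Spec_get_voting_key_py
  exact pv_main partecipants index p x hp hinv
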